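-- pv_equiv track=rewrite | github.com/earthscience2/SMARTCS_pole_ai | make_ai/smart_anal_ai.py | find_pole_position
-- ===== SOURCE A (Python) =====
-- def find_pole_position(pole_list, pole_id):
--     positions = []
--
--     # 전주 ID가 여러 번 등장하는 경우, 그 값과 함께 위치 저장
--     for index, pole in enumerate(pole_list):
--         if pole[0] == pole_id:  # pole[0]이 전주 ID라고 가정
--             positions.append((index + 1, pole[2]))  # 인덱스와 해당 값 (가중치)
--
--     if positions:
--         # 가장 높은 값을 가진 항목의 인덱스 반환
--         highest_position = max(positions, key=lambda x: x[1])  # 값이 가장 큰 항목 선택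
--         return highest_position[0]  # 인덱스 반환
--     else:
--         return -1  # 전주를 찾지 못한 경우 -1 반환
-- ===== SOURCE B (Python) =====
-- def find_pole_position(pole_list, pole_id):
--     best_index = -1
--     best_weight = None
--     for index, pole in enumerate(pole_list):
--         if pole[0] == pole_id and (best_weight is None or pole[2] > best_weight):
--             best_weight = pole[2]
--             best_index = index + 1
--     return best_index
-- ===== Notes on version B (the rewrite author's own statement) =====
-- stated objective: simpler
-- what changed: Replaces the collect-all-matches-into-a-list-then-max(key) pass with a single loop that maintains the best index and best weight directly (strict > keeps the first maximal match, like max).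
import Mathlib
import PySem

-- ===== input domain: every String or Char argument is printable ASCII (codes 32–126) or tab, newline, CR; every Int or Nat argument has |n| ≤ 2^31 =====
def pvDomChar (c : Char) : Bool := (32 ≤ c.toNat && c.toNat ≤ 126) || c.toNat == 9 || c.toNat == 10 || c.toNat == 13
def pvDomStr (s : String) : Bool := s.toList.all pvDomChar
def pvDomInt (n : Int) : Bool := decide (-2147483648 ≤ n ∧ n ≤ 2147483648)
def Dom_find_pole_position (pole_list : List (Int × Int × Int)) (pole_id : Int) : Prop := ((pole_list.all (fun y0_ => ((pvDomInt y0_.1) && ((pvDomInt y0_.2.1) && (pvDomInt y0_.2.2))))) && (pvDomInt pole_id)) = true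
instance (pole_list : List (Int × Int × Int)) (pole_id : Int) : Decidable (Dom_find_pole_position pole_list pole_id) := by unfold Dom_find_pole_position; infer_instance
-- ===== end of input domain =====

-- B replaces A's collect-matches-then-max(key) pass by a single loop that keeps the
-- best index and best weight directly (strict > keeps the first maximal match, like max).

-- ===== PORT A =====
-- collect (index+1, weight) for every matching pole, then take max by weight (first maximal), else -1
def find_pole_position (pole_list : List (Int × Int × Int)) (pole_id : Int) : Int :=
  let positions : List (Int × Int) :=
    (PySem.List.enumerate pole_list).foldl
      (fun acc p => if p.2.1 = pole_id then acc ++ [(p.1 + 1, p.2.2.2)] else acc) []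
  match PySem.List.max? positions (fun x => x.2) with
  | some m => m.1
  | none => -1

-- ===== PORT B =====
-- single pass keeping (best_index, best_weight); update on strict improvement
def find_pole_position_alt (pole_list : List (Int × Int × Int)) (pole_id : Int) : Int :=
  ((PySem.List.enumerate pole_list).foldl
    (fun (st : Int × Option Int) p =>
      if p.2.1 == pole_id && (match st.2 with | none => true | some w => decide (w < p.2.2.2)) then
        (p.1 + 1, some p.2.2.2)
      else st)
    (-1, none)).1

-- ===== PRECONDITION & SPEC =====
def Spec_find_pole_position (pole_list : List (Int × Int × Int)) (pole_id : Int) (out : Int) : Prop := out = find_pole_position_alt pole_list pole_id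
instance (pole_list : List (Int × Int × Int)) (pole_id : Int) (out : Int) : Decidable (Spec_find_pole_position pole_list pole_id out) := by unfold Spec_find_pole_position; infer_instance

-- ===== CLAIM (what is proved, stated in full; the proofs are below) =====
def Claim_equal_find_pole_position : Prop := ∀ (pole_list : List (Int × Int × Int)) (pole_id : Int), Dom_find_pole_position pole_list pole_id → Spec_find_pole_position pole_list pole_id (find_pole_position pole_list pole_id)

-- ===== LEMMAS AND PROOFS =====

-- B's state as a view of A's optional current maximum
def pvReflect (o : Option (Int × Int)) : Int × Option Int :=
  match o with
  | none => (-1, none)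
  | some m => (m.1, some m.2)

def pvStepA (pole_id : Int) (acc : List (Int × Int)) (p : Int × (Int × Int × Int)) : List (Int × Int) :=
  if p.2.1 = pole_id then acc ++ [(p.1 + 1, p.2.2.2)] else acc

def pvStepB (pole_id : Int) (st : Int × Option Int) (p : Int × (Int × Int × Int)) : Int × Option Int :=
  if p.2.1 == pole_id && (match st.2 with | none => true | some w => decide (w < p.2.2.2)) then
    (p.1 + 1, some p.2.2.2)
  else st

theorem max?_append_one (ps : List (Int × Int)) (x : Int × Int) :
    PySem.List.max? (ps ++ [x]) (fun y => y.2) =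
      match PySem.List.max? ps (fun y => y.2) with
      | none => some x
      | some m => if m.2 < x.2 then some x else some m := by
  cases hm : PySem.List.max? ps (fun y => y.2) with
  | none =>
    simp only [PySem.List.max?] at hm ⊢
    rw [List.foldl_append, List.foldl_cons, List.foldl_nil, hm]
  | some m =>
    simp only [PySem.List.max?] at hm ⊢
    rw [List.foldl_append, List.foldl_cons, List.foldl_nil, hm]

theorem pv_core (pole_id : Int) :
    ∀ (l : List (Int × (Int × Int × Int))) (ps : List (Int × Int)),
      pvReflect (PySem.List.max? (l.foldl (pvStepA pole_id) ps) (fun y => y.2)) =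
        l.foldl (pvStepB pole_id) (pvReflect (PySem.List.max? ps (fun y => y.2))) := by
  intro l
  induction l with
  | nil => intro ps; simp
  | cons p t ih =>
    intro ps
    simp only [List.foldl_cons]
    rw [ih]
    congr 1
    by_cases h : p.2.1 = pole_id
    · rw [pvStepA, if_pos h, max?_append_one]
      cases hm : PySem.List.max? ps (fun y => y.2) with
      | none => simp [pvReflect, pvStepB, h]
      | some m =>
        by_cases hw : m.2 < p.2.2.2
        · simp [pvReflect, pvStepB, h, hw]
        · simp [pvReflect, pvStepB, h, hw]
    · simp [pvStepA, pvStepB, h]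

-- ===== VERDICT (by name: the statement is the Claim_ definition above) =====
theorem find_pole_position_spec : Claim_equal_find_pole_position := by
  intro pole_list pole_id _
  show find_pole_position pole_list pole_id = find_pole_position_alt pole_list pole_id
  unfold find_pole_position find_pole_position_alt
  show (match PySem.List.max? ((PySem.List.enumerate pole_list).foldl (pvStepA pole_id) [])
          (fun x => x.2) with
        | some m => m.1
        | none => -1) =
      ((PySem.List.enumerate pole_list).foldl (pvStepB pole_id) (-1, none)).1
  have h2 : pvReflect (PySem.List.max?
        ((PySem.List.enumerate pole_list).foldl (pvStepA pole_id) []) (fun y => y.2)) =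
      (PySem.List.enumerate pole_list).foldl (pvStepB pole_id) (-1, none) :=
    pv_core pole_id (PySem.List.enumerate pole_list) []
  rw [← h2]
  cases PySem.List.max? ((PySem.List.enumerate pole_list).foldl (pvStepA pole_id) [])
      (fun y => y.2) with
  | none => rfl
  | some m => rfl
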